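-- pv_equiv track=rewrite | github.com/MustafaevAlim/LabPythonYandex | 4.4/5_3.py | rabbit
-- ===== SOURCE A (Python) =====
-- from itertools import product, accumulate
--
-- def povtor_10(x):
--     if x.count(10) > 1:
--         return False
--     return True
--
-- def rabbit(start, finish, step):
--     res = []
--
--     for jumps in product([-3, -1, 1, 3], repeat=step):
--
--         if sum(jumps) == finish - start:
--             ans = ([start] + [start + i for i in accumulate(jumps)])
--             if povtor_10(ans):
--                 res.append(ans)
--     return res
-- ===== SOURCE B (Python) =====
-- def rabbit(start, finish, step):
--     # Depth-first search over positions with an explicit stack and exact pruning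
--     # (a branch dies once two 10s have been visited, or the target can no longer
--     # be reached by the remaining odd jumps); jumps are pushed in reverse so the
--     # paths come out in product's lexicographic order.
--     res = []
--     stack = [(start, step, [start], 1 if start == 10 else 0)]
--     while stack:
--         pos, d, path, tens = stack.pop()
--         if tens > 1:
--             continue
--         need = finish - pos
--         if need > 3 * d or need < -3 * d or (need - d) % 2 != 0:
--             continue
--         if d <= 0:
--             if pos == finish:
--                 res.append(path)
--             continue
--         for j in (3, 1, -1, -3):
--             np = pos + j
--             stack.append((np, d - 1, path + [np], tens + (np == 10)))
--     return res
-- ===== Notes on version B (the rewrite author's own statement) =====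
-- stated objective: alternative
-- what changed: Replaced the generate-all-4^step-tuples-then-filter (itertools.product + sum + count) with a recursive DFS over positions that carries the running position, remaining depth and a count of visited 10s, pruning a branch as soon as two 10s appear or the target is unreachable by the remaining odd jumps (distance/parity bound), emitting paths in the same lexicographic order.
import Mathlib
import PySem

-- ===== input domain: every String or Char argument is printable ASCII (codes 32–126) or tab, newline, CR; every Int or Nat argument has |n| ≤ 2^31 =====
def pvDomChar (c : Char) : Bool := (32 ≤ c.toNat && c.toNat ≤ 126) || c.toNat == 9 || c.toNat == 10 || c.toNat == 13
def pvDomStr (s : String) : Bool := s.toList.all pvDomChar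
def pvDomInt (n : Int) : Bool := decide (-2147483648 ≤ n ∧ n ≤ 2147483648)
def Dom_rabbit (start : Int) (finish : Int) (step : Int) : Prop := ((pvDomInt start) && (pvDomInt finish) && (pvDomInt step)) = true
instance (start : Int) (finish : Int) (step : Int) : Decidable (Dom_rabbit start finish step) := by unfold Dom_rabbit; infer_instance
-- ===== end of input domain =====

-- B replaces product-then-filter by a DFS over positions with exact pruning (two 10s
-- seen, or target unreachable by the remaining odd jumps); same output, same order.

-- ===== PORT A =====
-- itertools.product([-3,-1,1,3], repeat=n), lexicographic order
def prodA : Nat → List (List Int)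
  | 0 => [[]]
  | n + 1 => ([-3, -1, 1, 3] : List Int).flatMap (fun j => (prodA n).map (j :: ·))

-- itertools.accumulate: running prefix sums
def accumA : List Int → List Int
  | [] => []
  | x :: xs => x :: (accumA xs).map (x + ·)

def povtor_10 (x : List Int) : Bool :=
  if x.count 10 > 1 then false else true

def rabbit (start : Int) (finish : Int) (step : Int) : List (List Int) :=
  (prodA step.toNat).foldl
    (fun res jumps =>
      if jumps.sum = finish - start then
        let ans := start :: (accumA jumps).map (fun i => start + i)
        if povtor_10 ans then res ++ [ans] else res
      else res) []

-- ===== PORT B =====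
-- fuel bound for the while-loop: size of the full 4-ary search tree of depth n
-- (one unit per loop iteration; purely a totality guard, never reached)
def wFrame : Nat → Nat
  | 0 => 1
  | n + 1 => 4 * wFrame n + 1

-- a frame is (position, remaining depth, path so far, number of 10s seen);
-- the stack's top is the head of the list
def runS (finish : Int) : Nat → List (Int × Int × List Int × Int) → List (List Int)
  | _, [] => []
  | 0, _ :: _ => []
  | fuel + 1, (pos, d, path, tens) :: rest =>
    if tens > 1 then runS finish fuel rest
    else if finish - pos > 3 * d ∨ finish - pos < -(3 * d) ∨ (finish - pos - d) % 2 ≠ 0 then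
      runS finish fuel rest
    else if d ≤ 0 then
      (if pos = finish then [path] else []) ++ runS finish fuel rest
    else
      runS finish fuel
        ((pos + -3, d - 1, path ++ [pos + -3], tens + if pos + -3 = 10 then 1 else 0)
          :: (pos + -1, d - 1, path ++ [pos + -1], tens + if pos + -1 = 10 then 1 else 0)
          :: (pos + 1, d - 1, path ++ [pos + 1], tens + if pos + 1 = 10 then 1 else 0)
          :: (pos + 3, d - 1, path ++ [pos + 3], tens + if pos + 3 = 10 then 1 else 0)
          :: rest)

def rabbit_alt (start : Int) (finish : Int) (step : Int) : List (List Int) :=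
  runS finish (wFrame step.toNat) [(start, step, [start], if start = 10 then 1 else 0)]

-- ===== PRECONDITION & SPEC =====
-- Pre_ excludes step < 0, on which Python A raises ValueError (product's repeat must be nonnegative).
def Pre_rabbit (_start : Int) (_finish : Int) (step : Int) : Prop := 0 ≤ step
instance (start : Int) (finish : Int) (step : Int) : Decidable (Pre_rabbit start finish step) := by unfold Pre_rabbit; infer_instance
def pvWitness_rabbit : Int × Int × Int := (7, 9, 2)

def Spec_rabbit (start : Int) (finish : Int) (step : Int) (out : List (List Int)) : Prop := out = rabbit_alt start finish step
instance (start : Int) (finish : Int) (step : Int) (out : List (List Int)) : Decidable (Spec_rabbit start finish step out) := by unfold Spec_rabbit; infer_instance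

-- ===== CLAIM (what is proved, stated in full; the proofs are below) =====
def Claim_equal_rabbit : Prop := ∀ (start : Int) (finish : Int) (step : Int), Dom_rabbit start finish step → Pre_rabbit start finish step → Spec_rabbit start finish step (rabbit start finish step)

-- ===== LEMMAS AND PROOFS =====

lemma wFrame_pos (n : Nat) : 1 ≤ wFrame n := by
  cases n
  · simp [wFrame]
  · simp [wFrame]

-- proof-side helper: the same search written recursively (depth-first); the BFS port is
-- related to it frame by frame, and it in turn to A's product+filter.
def dfsB (finish : Int) : Int → Nat → List Int → Int → List (List Int)
  | pos, d, path, tens =>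
    if tens > 1 then []
    else if finish - pos > 3 * (d : Int) ∨ finish - pos < -(3 * (d : Int)) ∨ (finish - pos - (d : Int)) % 2 ≠ 0 then []
    else
      match d with
      | 0 => if pos = finish then [path] else []
      | Nat.succ d' =>
        ([-3, -1, 1, 3] : List Int).flatMap (fun j =>
          dfsB finish (pos + j) d' (path ++ [pos + j])
            (tens + if pos + j = 10 then 1 else 0))


-- every tuple produced by prodA n has length-n sum bounds and parity
lemma prodA_sum {n : Nat} {js : List Int} (h : js ∈ prodA n) :
    js.sum ≤ 3 * (n : Int) ∧ -(3 * (n : Int)) ≤ js.sum ∧ (js.sum - (n : Int)) % 2 = 0 := by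
  induction n generalizing js with
  | zero => simp [prodA] at h; simp [h]
  | succ n ih =>
    rw [prodA, List.mem_flatMap] at h
    obtain ⟨j, hj, hm⟩ := h
    rw [List.mem_map] at hm
    obtain ⟨js', hjs', rfl⟩ := hm
    obtain ⟨h1, h2, h3⟩ := ih hjs'
    simp only [List.mem_cons] at hj
    simp only [List.sum_cons]
    push_cast
    rcases hj with rfl | rfl | rfl | hj
    · omega
    · omega
    · omega
    · rcases hj with rfl | h
      · omega
      · simp at h

-- generic shape of A's loop: foldl with two nested ifs = flatMap of an if
lemma foldl_if2 {α β : Type} (P : α → Prop) [DecidablePred P] (Q : α → Bool) (f : α → β) :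
    ∀ (l : List α) (acc : List β),
      l.foldl (fun res x => if P x then (if Q x then res ++ [f x] else res) else res) acc
        = acc ++ l.flatMap (fun x => if P x ∧ Q x = true then [f x] else []) := by
  intro l
  induction l with
  | nil => intro acc; simp
  | cons x xs ih =>
    intro acc
    simp only [List.foldl_cons, List.flatMap_cons, ih]
    by_cases hP : P x <;> by_cases hQ : Q x = true <;> simp [hP, hQ]

lemma count_append_one (path : List Int) (y : Int) :
    ((path ++ [y]).count 10 : Int) = (path.count 10 : Int) + (if y = 10 then 1 else 0) := by
  by_cases h : y = 10 <;> simp [List.count_append, h]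

-- the DFS computes exactly A's filtered flatMap over the full product
lemma dfs_eq (finish : Int) (n : Nat) : ∀ (pos : Int) (path : List Int),
    dfsB finish pos n path ((path.count 10 : Nat) : Int)
      = (prodA n).flatMap (fun js =>
          if pos + js.sum = finish ∧ (path ++ (accumA js).map (pos + ·)).count 10 ≤ 1 then
            [path ++ (accumA js).map (pos + ·)]
          else []) := by
  induction n with
  | zero =>
    intro pos path
    rw [dfsB]
    by_cases ht : ((path.count 10 : Nat) : Int) > 1
    · have hc : ¬ ((path ++ (accumA ([] : List Int)).map (pos + ·)).count 10 ≤ 1) := by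
        simp [accumA]; omega
      rw [if_pos ht]
      simp only [List.count_append] at hc
      simp [prodA]
      intro h
      omega
    · rw [if_neg ht]
      by_cases hp : pos = finish
      · have hr : ¬ (finish - pos > 3 * ((0 : Nat) : Int) ∨ finish - pos < -(3 * ((0 : Nat) : Int)) ∨ (finish - pos - ((0 : Nat) : Int)) % 2 ≠ 0) := by
          simp [hp]
        rw [if_neg hr]
        have hcnt : (path ++ (accumA ([] : List Int)).map (pos + ·)).count 10 ≤ 1 := by
          simp [accumA]; omega
        simp only [List.count_append] at hcnt
        simp [prodA, accumA, hp]
        omega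
      · by_cases hr : finish - pos > 3 * ((0 : Nat) : Int) ∨ finish - pos < -(3 * ((0 : Nat) : Int)) ∨ (finish - pos - ((0 : Nat) : Int)) % 2 ≠ 0
        · rw [if_pos hr]
          simp [prodA]
          intro h
          exact absurd h hp
        · rw [if_neg hr]
          push_cast at hr
          exfalso; apply hp; omega
  | succ n ih =>
    intro pos path
    rw [dfsB]
    by_cases ht : ((path.count 10 : Nat) : Int) > 1
    · rw [if_pos ht]
      symm
      rw [List.flatMap_eq_nil_iff]
      intro js _
      simp only [List.count_append]
      simp
      intro h
      omega
    · rw [if_neg ht]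
      by_cases hr : finish - pos > 3 * ((n + 1 : Nat) : Int) ∨ finish - pos < -(3 * ((n + 1 : Nat) : Int)) ∨ (finish - pos - ((n + 1 : Nat) : Int)) % 2 ≠ 0
      · rw [if_pos hr]
        symm
        rw [List.flatMap_eq_nil_iff]
        intro js hjs
        obtain ⟨h1, h2, h3⟩ := prodA_sum hjs
        have : ¬ (pos + js.sum = finish) := by omega
        simp [this]
      · rw [if_neg hr]
        have step : ∀ j : Int,
            dfsB finish (pos + j) n (path ++ [pos + j])
              (((path.count 10 : Nat) : Int) + if pos + j = 10 then 1 else 0)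
              = (prodA n).flatMap (fun js =>
                  if (pos + j) + js.sum = finish ∧ ((path ++ [pos + j]) ++ (accumA js).map ((pos + j) + ·)).count 10 ≤ 1 then
                    [(path ++ [pos + j]) ++ (accumA js).map ((pos + j) + ·)]
                  else []) := by
          intro j
          rw [← count_append_one, ih (pos + j) (path ++ [pos + j])]
        simp only [step]
        rw [show prodA (n + 1) = ([-3, -1, 1, 3] : List Int).flatMap (fun j => (prodA n).map (j :: ·)) from rfl]
        simp only [List.flatMap_assoc, List.flatMap_map]
        apply List.flatMap_congr
        intro j _
        apply List.flatMap_congr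
        intro js _
        have hsum : (pos + (j :: js).sum = finish) ↔ ((pos + j) + js.sum = finish) := by
          rw [List.sum_cons]; constructor <;> intro h <;> omega
        have hpath : path ++ (accumA (j :: js)).map (pos + ·)
            = (path ++ [pos + j]) ++ (accumA js).map ((pos + j) + ·) := by
          rw [show accumA (j :: js) = j :: (accumA js).map (j + ·) from rfl]
          simp only [List.map_cons, List.map_map, List.append_assoc, List.singleton_append]
          congr 2
          apply List.map_congr_left
          intro a _
          simp [Function.comp]; ring
        rw [hpath]
        by_cases h : ((pos + j) + js.sum = finish) ∧ ((path ++ [pos + j]) ++ (accumA js).map ((pos + j) + ·)).count 10 ≤ 1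
        · rw [if_pos h, if_pos ⟨hsum.mpr h.1, h.2⟩]
        · rw [if_neg h, if_neg (fun hc => h ⟨hsum.mp hc.1, hc.2⟩)]

lemma povtor_iff (x : List Int) : povtor_10 x = true ↔ x.count 10 ≤ 1 := by
  unfold povtor_10; split <;> simp <;> omega

-- proof-side twin of runS for a single frame (same branch structure, Int depth)
def dfsI (finish : Int) (pos : Int) (d : Int) (path : List Int) (tens : Int) : List (List Int) :=
  if tens > 1 then []
  else if finish - pos > 3 * d ∨ finish - pos < -(3 * d) ∨ (finish - pos - d) % 2 ≠ 0 then []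
  else if d ≤ 0 then (if pos = finish then [path] else [])
  else ([-3, -1, 1, 3] : List Int).flatMap (fun j =>
    dfsI finish (pos + j) (d - 1) (path ++ [pos + j]) (tens + if pos + j = 10 then 1 else 0))
termination_by d.toNat
decreasing_by omega

-- with enough fuel, the explicit stack processes its frames left to right
lemma runS_flat (finish : Int) : ∀ (fuel : Nat) (stack : List (Int × Int × List Int × Int)),
    (stack.map (fun fr => wFrame fr.2.1.toNat)).sum ≤ fuel →
    runS finish fuel stack = stack.flatMap (fun fr => dfsI finish fr.1 fr.2.1 fr.2.2.1 fr.2.2.2) := by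
  intro fuel
  induction fuel with
  | zero =>
    intro stack h
    cases stack with
    | nil => simp [runS]
    | cons fr rest =>
      exfalso
      have := wFrame_pos fr.2.1.toNat
      simp only [List.map_cons, List.sum_cons] at h
      omega
  | succ fuel ih =>
    intro stack h
    cases stack with
    | nil => simp [runS]
    | cons fr rest =>
      obtain ⟨pos, d, path, tens⟩ := fr
      simp only [List.map_cons, List.sum_cons] at h
      have hw := wFrame_pos d.toNat
      rw [runS]
      rw [List.flatMap_cons]
      by_cases ht : tens > (1 : Int)
      · rw [if_pos ht, ih rest (by omega)]
        rw [dfsI, if_pos ht]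
        rfl
      · rw [if_neg ht]
        by_cases hr : finish - pos > 3 * d ∨ finish - pos < -(3 * d) ∨ (finish - pos - d) % 2 ≠ 0
        · rw [if_pos hr, ih rest (by omega)]
          rw [dfsI, if_neg ht, if_pos hr]
          rfl
        · rw [if_neg hr]
          by_cases hd : d ≤ (0 : Int)
          · rw [if_pos hd, ih rest (by omega)]
            rw [dfsI, if_neg ht, if_neg hr, if_pos hd]
          · rw [if_neg hd]
            have hsplit : d.toNat = (d - 1).toNat + 1 := by omega
            have hww : wFrame ((d - 1).toNat + 1) = 4 * wFrame ((d - 1).toNat) + 1 := rfl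
            rw [ih _ (by simp only [List.map_cons, List.sum_cons]; rw [hsplit, hww] at h; omega)]
            simp only [List.flatMap_cons]
            conv_rhs => rw [dfsI]
            rw [if_neg ht, if_neg hr, if_neg hd]
            simp [List.append_assoc]

-- on nonnegative depth the Int-depth search is the Nat-depth search
lemma dfsI_eq_dfsB (finish : Int) : ∀ (n : Nat) (pos : Int) (d : Int) (path : List Int) (tens : Int),
    0 ≤ d → d.toNat = n → dfsI finish pos d path tens = dfsB finish pos n path tens := by
  intro n
  induction n with
  | zero =>
    intro pos d path tens h0 hn
    have hd : d = 0 := by omega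
    subst hd
    rw [dfsI, dfsB]
    norm_num
  | succ n ih =>
    intro pos d path tens h0 hn
    have hd : d = ((n : Int) + 1) := by omega
    subst hd
    rw [dfsI, dfsB]
    have h1 : ¬ ((n : Int) + 1 ≤ 0) := by omega
    rw [if_neg h1]
    have h2 : ((n + 1 : Nat) : Int) = (n : Int) + 1 := by push_cast; ring
    rw [h2]
    by_cases ht : tens > (1 : Int)
    · rw [if_pos ht, if_pos ht]
    · rw [if_neg ht, if_neg ht]
      by_cases hr : finish - pos > 3 * ((n : Int) + 1) ∨ finish - pos < -(3 * ((n : Int) + 1)) ∨ (finish - pos - ((n : Int) + 1)) % 2 ≠ 0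
      · rw [if_pos hr, if_pos hr]
      · rw [if_neg hr, if_neg hr]
        apply List.flatMap_congr
        intro j _
        have h3 : (n : Int) + 1 - 1 = (n : Int) := by ring
        rw [h3, ih _ _ _ _ (by omega) (by omega)]

-- ===== VERDICT (by name: the statement is the Claim_ definition above) =====
theorem rabbit_spec : Claim_equal_rabbit := by
  intro start finish step _ hpre
  unfold Spec_rabbit rabbit rabbit_alt
  rw [foldl_if2, runS_flat finish _ _ (by simp)]
  simp only [List.flatMap_cons, List.flatMap_nil, List.append_nil]
  rw [dfsI_eq_dfsB finish step.toNat start step [start] _ hpre rfl]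
  have hcnt : (if start = 10 then (1 : Int) else 0) = (([start].count 10 : Nat) : Int) := by
    by_cases h : start = 10 <;> simp [h]
  rw [hcnt, dfs_eq, List.nil_append]
  apply List.flatMap_congr
  intro js _
  have h1 : (js.sum = finish - start) ↔ (start + js.sum = finish) := by omega
  have h2 : start :: (accumA js).map (fun i => start + i) = [start] ++ (accumA js).map (start + ·) := by
    rfl
  rw [h2]
  by_cases h : js.sum = finish - start ∧ povtor_10 ([start] ++ (accumA js).map (start + ·)) = true
  · rw [if_pos h, if_pos ⟨h1.mp h.1, (povtor_iff _).mp h.2⟩]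
  · rw [if_neg h, if_neg (fun hc => h ⟨h1.mpr hc.1, (povtor_iff _).mpr hc.2⟩)]
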